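-- pv_equiv track=rewrite | github.com/kauderk/youtube-browser-api | src/routes/test.py | get_popular_moments
-- ===== SOURCE A (Python) =====
-- def get_popular_moments(data):
--     popular_moments = []
--     max_score = -1
--     for moment in data:
--         start = moment["start"]
--         end = moment["end"]
--         score = moment["value"]
--         if score > max_score:
--             popular_moments = [(start, end)]
--             max_score = score
--         elif score == max_score:
--             popular_moments.append((start, end))
--     return popular_moments
-- ===== SOURCE B (Python) =====
-- def get_popular_moments(data):
--     pairs = [(m["start"], m["end"], m["value"]) for m in data]
--     threshold = -1
--     for _, _, v in pairs:
--         if v > threshold: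
--             threshold = v
--     return [(s, e) for (s, e, v) in pairs if v == threshold]
-- ===== Notes on version B (the rewrite author's own statement) =====
-- stated objective: simpler
-- what changed: Replaces the single streaming reset-and-accumulate loop (which rebuilds the result list on every new maximum) by two plain passes: compute the threshold (max value, floored at -1), then filter the (start,end) pairs whose value equals it.
import Mathlib
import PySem

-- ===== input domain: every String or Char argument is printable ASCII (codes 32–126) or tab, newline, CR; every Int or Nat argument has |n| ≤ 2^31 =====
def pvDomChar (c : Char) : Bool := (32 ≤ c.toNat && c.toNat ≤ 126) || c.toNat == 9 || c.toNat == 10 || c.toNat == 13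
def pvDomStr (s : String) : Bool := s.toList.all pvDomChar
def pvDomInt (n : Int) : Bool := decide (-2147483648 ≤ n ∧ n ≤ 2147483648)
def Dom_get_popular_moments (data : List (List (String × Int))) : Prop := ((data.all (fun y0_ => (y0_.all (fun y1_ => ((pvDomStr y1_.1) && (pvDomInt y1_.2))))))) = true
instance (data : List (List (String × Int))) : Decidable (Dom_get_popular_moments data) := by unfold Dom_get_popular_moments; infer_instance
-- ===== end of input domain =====

-- B separates A's single reset-and-accumulate loop into two plain passes (max then filter); same cost, simpler shape.

-- dict lookup moment[k] (first match; Python raises KeyError when absent — excluded by Pre_, default 0 unreachable there)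
def pvKey (m : List (String × Int)) (k : String) : Int :=
  ((m.find? (fun p => p.1 == k)).map (·.2)).getD 0

-- ===== PORT A =====
def get_popular_moments (data : List (List (String × Int))) : List (Int × Int) :=
  (data.foldl (fun acc moment =>
      let start := pvKey moment "start"
      let «end» := pvKey moment "end"
      let score := pvKey moment "value"
      if score > acc.2 then ([(start, «end»)], score)
      else if score == acc.2 then (acc.1 ++ [(start, «end»)], acc.2)
      else acc) ([], -1)).1

-- ===== PORT B =====
def get_popular_moments_alt (data : List (List (String × Int))) : List (Int × Int) :=
  let pairs := data.map (fun m => (pvKey m "start", pvKey m "end", pvKey m "value"))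
  let threshold := pairs.foldl (fun t p => if p.2.2 > t then p.2.2 else t) (-1)
  (pairs.filter (fun p => p.2.2 == threshold)).map (fun p => (p.1, p.2.1))

-- ===== PRECONDITION & SPEC =====
-- Pre_: every moment carries the keys "start", "end" and "value"; on any other input the Python A
-- (and B alike) raises KeyError, so nothing is claimed there.
def Pre_get_popular_moments (data : List (List (String × Int))) : Prop :=
  ∀ m ∈ data, "start" ∈ m.map (·.1) ∧ "end" ∈ m.map (·.1) ∧ "value" ∈ m.map (·.1)
instance (data : List (List (String × Int))) : Decidable (Pre_get_popular_moments data) := by unfold Pre_get_popular_moments; infer_instance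

def pvWitness_get_popular_moments : (List (List (String × Int))) :=
  [[("start", 1), ("end", 2), ("value", 3)], [("start", 4), ("end", 5), ("value", 3)]]

def Spec_get_popular_moments (data : List (List (String × Int))) (out : List (Int × Int)) : Prop := out = get_popular_moments_alt data
instance (data : List (List (String × Int))) (out : List (Int × Int)) : Decidable (Spec_get_popular_moments data out) := by unfold Spec_get_popular_moments; infer_instance

-- ===== CLAIM (what is proved, stated in full; the proofs are below) =====
def Claim_equal_get_popular_moments : Prop := ∀ (data : List (List (String × Int))), Dom_get_popular_moments data → Pre_get_popular_moments data → Spec_get_popular_moments data (get_popular_moments data)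

-- ===== LEMMAS AND PROOFS =====

-- A's loop body, on the already-extracted (start, end, value) triple
def pvStepA (acc : List (Int × Int) × Int) (p : Int × Int × Int) : List (Int × Int) × Int :=
  if p.2.2 > acc.2 then ([(p.1, p.2.1)], p.2.2)
  else if p.2.2 == acc.2 then (acc.1 ++ [(p.1, p.2.1)], acc.2)
  else acc

-- B's threshold (max value, floored at -1)
def pvMx (ps : List (Int × Int × Int)) : Int :=
  ps.foldl (fun t p => if p.2.2 > t then p.2.2 else t) (-1)

theorem pvMx_concat (l : List (Int × Int × Int)) (a : Int × Int × Int) :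
    pvMx (l ++ [a]) = if a.2.2 > pvMx l then a.2.2 else pvMx l := by
  simp [pvMx, List.foldl_append]

theorem pv_le_foldl (ps : List (Int × Int × Int)) (t : Int) :
    t ≤ ps.foldl (fun t p => if p.2.2 > t then p.2.2 else t) t := by
  induction ps generalizing t with
  | nil => simp
  | cons x xs ih =>
    simp only [List.foldl_cons]
    refine le_trans ?_ (ih _)
    split <;> omega

theorem pv_mem_le_mx (ps : List (Int × Int × Int)) (p : Int × Int × Int) (hp : p ∈ ps) :
    p.2.2 ≤ pvMx ps := by
  unfold pvMx
  generalize (-1 : Int) = t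
  induction ps generalizing t with
  | nil => cases hp
  | cons x xs ih =>
    simp only [List.foldl_cons]
    rcases List.mem_cons.mp hp with h | h
    · subst h
      refine le_trans ?_ (pv_le_foldl xs _)
      split <;> omega
    · exact ih h _

-- main invariant: A's fold over the triples equals (B's filtered list, B's threshold)
theorem pv_inv (ps : List (Int × Int × Int)) :
    ps.foldl pvStepA ([], -1) =
      ((ps.filter (fun p => p.2.2 == pvMx ps)).map (fun p => (p.1, p.2.1)), pvMx ps) := by
  induction ps using List.reverseRecOn with
  | nil => rfl
  | append_singleton l a ih =>
    rw [List.foldl_append, ih, pvMx_concat]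
    by_cases h : a.2.2 > pvMx l
    · have hnil : l.filter (fun p => p.2.2 == a.2.2) = [] := by
        rw [List.filter_eq_nil_iff]
        intro p hp
        have := pv_mem_le_mx l p hp
        simp only [beq_iff_eq]
        omega
      simp [pvStepA, h, List.filter_append, hnil]
    · by_cases he : a.2.2 = pvMx l
      · simp [pvStepA, he, List.filter_append]
      · have : ¬ (a.2.2 == pvMx l) = true := by simp [he]
        simp [pvStepA, h, List.filter_append, this]

-- ===== VERDICT (by name: the statement is the Claim_ definition above) =====
theorem get_popular_moments_spec : Claim_equal_get_popular_moments := by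
  intro data _ _
  unfold Spec_get_popular_moments get_popular_moments get_popular_moments_alt
  have hmap :
      (data.map (fun m => (pvKey m "start", pvKey m "end", pvKey m "value"))).foldl pvStepA ([], -1)
        = data.foldl (fun acc moment =>
            let start := pvKey moment "start"
            let «end» := pvKey moment "end"
            let score := pvKey moment "value"
            if score > acc.2 then ([(start, «end»)], score)
            else if score == acc.2 then (acc.1 ++ [(start, «end»)], acc.2)
            else acc) ([], -1) := by
    rw [List.foldl_map]
    rfl
  rw [← hmap, pv_inv]
  rfl
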